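-- pv_equiv track=rewrite | github.com/zheng-gao/ez_code | src/ezcode/math/permutation.py | selected_permutations
-- ===== SOURCE A (Python) =====
-- def selected_permutations(selection_size: int, items: list) -> list:
--
--     def _selected_permutations(selection_size: int, items: list, selected_indices: set(), permutation: list, result: list):
--         if len(permutation) == selection_size:
--             result.append(permutation.copy())
--             return
--         selected_items = set()
--         for i in range(len(items)):
--             if i not in selected_indices:
--                 if items[i] not in selected_items: # check for duplicate items
--                     selected_items.add(items[i])   #
--                     selected_indices.add(i)
--                     permutation.append(items[i])
--                     _selected_permutations(selection_size, items, selected_indices, permutation, result)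
--                     permutation.pop()
--                     selected_indices.remove(i)
--
--     if items is None:
--         return None
--     if selection_size > len(items):
--         raise ValueError(f"selection_size:{selection_size} cannot be greater than len(items):{len(items)}")
--     if selection_size < 0:
--         raise ValueError(f"selection_size:{selection_size} cannot be negative")
--     result = list()
--     _selected_permutations(selection_size, items, set(), list(), result)
--     return result
-- ===== SOURCE B (Python) =====
-- def selected_permutations(selection_size: int, items: list) -> list:
--     if items is None:
--         return None
--     if selection_size > len(items):
--         raise ValueError(f"selection_size:{selection_size} cannot be greater than len(items):{len(items)}")
--     if selection_size < 0:
--         raise ValueError(f"selection_size:{selection_size} cannot be negative")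
--     # breadth-first: build all index tuples of the given size, level by level
--     prefixes = [[]]
--     for _ in range(selection_size):
--         prefixes = [p + [i] for p in prefixes for i in range(len(items)) if i not in p]
--     # map to values and keep the first occurrence of each value tuple
--     seen = set()
--     result = []
--     for p in prefixes:
--         vals = [items[i] for i in p]
--         key = tuple(vals)
--         if key not in seen:
--             seen.add(key)
--             result.append(vals)
--     return result
-- ===== Notes on version B (the rewrite author's own statement) =====
-- stated objective: alternative
-- what changed: Replaces A's recursive backtracking with per-level duplicate-value pruning by a breadth-first construction of all index tuples followed by one global first-occurrence dedup pass over the value tuples.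
import Mathlib
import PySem

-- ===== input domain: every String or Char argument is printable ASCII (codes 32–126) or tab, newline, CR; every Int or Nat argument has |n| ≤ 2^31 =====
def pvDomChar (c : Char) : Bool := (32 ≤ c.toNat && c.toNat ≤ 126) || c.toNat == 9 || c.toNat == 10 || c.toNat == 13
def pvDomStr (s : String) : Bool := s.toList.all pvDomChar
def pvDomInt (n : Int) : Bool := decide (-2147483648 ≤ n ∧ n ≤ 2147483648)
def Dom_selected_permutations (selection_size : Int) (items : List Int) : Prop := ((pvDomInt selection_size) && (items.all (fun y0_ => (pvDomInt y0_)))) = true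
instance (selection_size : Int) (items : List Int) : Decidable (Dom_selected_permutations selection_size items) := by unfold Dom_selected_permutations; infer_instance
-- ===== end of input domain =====

-- B replaces A's recursive backtracking (per-level duplicate-value pruning) by breadth-first
-- construction of all index tuples followed by a single global first-occurrence dedup pass;
-- objective: alternative algorithm, same return value on the stated precondition.

-- ===== PORT A =====
-- _selected_permutations: fuel makes the recursion total (fuel = len(items)+1 at the top call
-- always suffices on Pre_); indices i from range(len(items)) are always in bounds, so
-- items.getD i 0 is exactly Python's items[i].
def paRec (fuel : Nat) (selection_size : Int) (items : List Int) (selIdx : PySem.Set Nat)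
    (perm : List Int) (result : List (List Int)) : List (List Int) :=
  match fuel with
  | 0 => result
  | f + 1 =>
    if (perm.length : Int) = selection_size then result ++ [perm]
    else
      ((List.range items.length).foldl
        (fun (st : PySem.Set Int × List (List Int)) (i : Nat) =>
          if i ∈ selIdx then st
          else if items.getD i 0 ∈ st.1 then st
          else (PySem.Set.add st.1 (items.getD i 0),
                paRec f selection_size items (PySem.Set.add selIdx i)
                  (perm ++ [items.getD i 0]) st.2))
        ((PySem.Set.empty : PySem.Set Int), result)).2

-- A raises ValueError when selection_size > len(items) or selection_size < 0 (excluded by Pre_);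
-- the port returns [] there.
def selected_permutations (selection_size : Int) (items : List Int) : List (List Int) :=
  if selection_size > (items.length : Int) then []
  else if selection_size < 0 then []
  else paRec (items.length + 1) selection_size items (PySem.Set.empty : PySem.Set Nat) [] []

-- ===== PORT B =====
-- one BFS level: [p + [i] for p in prefixes for i in range(len(items)) if i not in p]
def pbStep (items : List Int) (prefixes : List (List Nat)) : List (List Nat) :=
  prefixes.flatMap (fun p =>
    ((List.range items.length).filter (fun i => decide (i ∉ p))).map (fun i => p ++ [i]))

-- final pass: map index tuples to value lists, keep first occurrence of each value list
def pbDedup (items : List Int) (seen : PySem.Set (List Int)) : List (List Nat) → List (List Int)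
  | [] => []
  | p :: ps =>
    let vals := p.map (fun i => items.getD i 0)
    if vals ∈ seen then pbDedup items seen ps
    else vals :: pbDedup items (PySem.Set.add seen vals) ps

-- B raises the same two ValueErrors (excluded by Pre_); the port returns [] there.
def selected_permutations_alt (selection_size : Int) (items : List Int) : List (List Int) :=
  if selection_size > (items.length : Int) then []
  else if selection_size < 0 then []
  else
    pbDedup items (PySem.Set.empty : PySem.Set (List Int))
      ((List.range selection_size.toNat).foldl (fun ps _ => pbStep items ps) [[]])

-- ===== PRECONDITION & SPEC =====
-- Pre_ excludes exactly the inputs on which A raises ValueError: selection_size negative or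
-- greater than len(items).  (items is a List Int, so Python's None input is not representable.)
def Pre_selected_permutations (selection_size : Int) (items : List Int) : Prop :=
  0 ≤ selection_size ∧ selection_size ≤ (items.length : Int)
instance (selection_size : Int) (items : List Int) : Decidable (Pre_selected_permutations selection_size items) := by unfold Pre_selected_permutations; infer_instance
def pvWitness_selected_permutations : Int × List Int := (2, [1, 1, 2])

def Spec_selected_permutations (selection_size : Int) (items : List Int) (out : List (List Int)) : Prop := out = selected_permutations_alt selection_size items
instance (selection_size : Int) (items : List Int) (out : List (List Int)) : Decidable (Spec_selected_permutations selection_size items out) := by unfold Spec_selected_permutations; infer_instance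

-- ===== CLAIM (what is proved, stated in full; the proofs are below) =====
def Claim_equal_selected_permutations : Prop := ∀ (selection_size : Int) (items : List Int), Dom_selected_permutations selection_size items → Pre_selected_permutations selection_size items → Spec_selected_permutations selection_size items (selected_permutations selection_size items)

-- ===== LEMMAS AND PROOFS =====

def pvG (items : List Int) : Nat → List Nat → List (List Int)
  | 0, _ => [[]]
  | r + 1, U =>
    (List.range items.length).flatMap (fun i =>
      if i ∈ U then [] else (pvG items r (i :: U)).map (fun t => items.getD i 0 :: t))

def pvAvail (items : List Int) (U : List Nat) : Multiset Int :=
  (((List.range items.length).filter (fun i => decide (i ∉ U))).map (fun i => items.getD i 0) : List Int)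

theorem pvG_congr (items : List Int) (r : Nat) : ∀ (U₁ U₂ : List Nat), (∀ j, j ∈ U₁ ↔ j ∈ U₂) → pvG items r U₁ = pvG items r U₂ := by
  induction r with
  | zero => intros; rfl
  | succ r ih =>
    intro U₁ U₂ h
    simp only [pvG]
    congr 1
    funext i
    by_cases hi : i ∈ U₁
    · rw [if_pos hi, if_pos ((h i).mp hi)]
    · rw [if_neg hi, if_neg (fun c => hi ((h i).mpr c))]
      rw [ih (i :: U₁) (i :: U₂) (fun j => by simp only [List.mem_cons]; rw [h j])]

theorem pvAvail_mem (items : List Int) (U : List Nat) (i : Nat) (hi : i < items.length) (hU : i ∉ U) :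
    items.getD i 0 ∈ pvAvail items U := by
  simp only [pvAvail, Multiset.mem_coe, List.mem_map, List.mem_filter, List.mem_range]
  exact ⟨i, ⟨hi, by simpa using hU⟩, rfl⟩

theorem pvAvail_cons (items : List Int) (U : List Nat) (i : Nat) (hi : i < items.length) (hU : i ∉ U) :
    pvAvail items (i :: U) = (pvAvail items U).erase (items.getD i 0) := by
  have hfil : (List.range items.length).filter (fun j => decide (j ∉ i :: U))
      = ((List.range items.length).filter (fun j => decide (j ∉ U))).filter (fun j => decide (j ≠ i)) := by
    rw [List.filter_filter]
    refine List.filter_congr fun j _ => ?_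
    by_cases h1 : j = i <;> by_cases h2 : j ∈ U <;> simp [h1, h2, List.mem_cons]
  set L := (List.range items.length).filter (fun j => decide (j ∉ U)) with hL
  have hnd : L.Nodup := List.Nodup.filter _ (List.nodup_range)
  have hiL : i ∈ L := by
    simp only [hL, List.mem_filter, List.mem_range]
    exact ⟨hi, by simpa using hU⟩
  have herase : L.filter (fun j => decide (j ≠ i)) = L.erase i := by
    rw [hnd.erase_eq_filter i]
    exact List.filter_congr fun j _ => by by_cases h : j = i <;> simp [bne, h]
  have : pvAvail items (i :: U) = ((L.erase i).map (fun j => items.getD j 0) : List Int) := by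
    simp only [pvAvail, hfil, herase]
  rw [this]
  have hms : ((L.erase i : List Nat) : Multiset Nat) = (↑L : Multiset Nat).erase i := by
    simp [Multiset.coe_erase]
  have : pvAvail items U = Multiset.map (fun j => items.getD j 0) (↑L : Multiset Nat) := by
    simp [pvAvail, hL]
  rw [this]
  have : ((L.erase i).map (fun j => items.getD j 0) : List Int)
      = Multiset.map (fun j => items.getD j 0) ((↑L : Multiset Nat).erase i) := by
    rw [← hms]; rfl
  rw [this, Multiset.map_erase_of_mem _ _ (by simpa using hiL)]

theorem myCons_le {α : Type} [DecidableEq α] {a : α} {s t : Multiset α} :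
    a ::ₘ s ≤ t ↔ a ∈ t ∧ s ≤ t.erase a := by
  constructor
  · intro h
    refine ⟨Multiset.mem_of_le h (Multiset.mem_cons_self a s), ?_⟩
    have := Multiset.erase_le_erase a h
    simpa using this
  · rintro ⟨ha, hs⟩
    calc a ::ₘ s ≤ a ::ₘ t.erase a := Multiset.cons_le_cons a hs
    _ = t := Multiset.cons_erase ha

theorem pvG_mem (items : List Int) (r : Nat) : ∀ (U : List Nat) (x : List Int),
    x ∈ pvG items r U ↔ x.length = r ∧ (↑x : Multiset Int) ≤ pvAvail items U := by
  induction r with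
  | zero =>
    intro U x
    simp only [pvG, List.mem_singleton]
    constructor
    · rintro rfl; simp
    · rintro ⟨h, -⟩; exact List.eq_nil_of_length_eq_zero h
  | succ r ih =>
    intro U x
    simp only [pvG, List.mem_flatMap, List.mem_range]
    constructor
    · rintro ⟨i, hi, hx⟩
      by_cases hiU : i ∈ U
      · simp [if_pos hiU] at hx
      rw [if_neg hiU] at hx
      obtain ⟨t, ht, rfl⟩ := List.mem_map.mp hx
      obtain ⟨hlen, hle⟩ := (ih _ _).mp ht
      refine ⟨by simp [hlen], ?_⟩
      rw [pvAvail_cons items U i hi hiU] at hle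
      have : (↑(items.getD i 0 :: t) : Multiset Int) = items.getD i 0 ::ₘ (↑t : Multiset Int) := rfl
      rw [this, myCons_le]
      exact ⟨pvAvail_mem items U i hi hiU, hle⟩
    · rintro ⟨hlen, hle⟩
      match x with
      | [] => simp at hlen
      | v :: t =>
        have hvt : (↑(v :: t) : Multiset Int) = v ::ₘ (↑t : Multiset Int) := rfl
        rw [hvt, myCons_le] at hle
        obtain ⟨hv, ht⟩ := hle
        simp only [pvAvail, Multiset.mem_coe, List.mem_map, List.mem_filter, List.mem_range] at hv
        obtain ⟨i, ⟨hi, hiU⟩, rfl⟩ := hv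
        have hiU' : i ∉ U := by simpa using hiU
        refine ⟨i, hi, ?_⟩
        rw [if_neg hiU']
        refine List.mem_map.mpr ⟨t, ?_, rfl⟩
        refine (ih _ _).mpr ⟨by simpa using hlen, ?_⟩
        rw [pvAvail_cons items U i hi hiU']
        exact ht
def dgo (seen : List (List Int)) : List (List Int) → List (List Int)
  | [] => []
  | x :: xs => if x ∈ seen then dgo seen xs else x :: dgo (seen ++ [x]) xs

theorem dgo_agree (L : List (List Int)) : ∀ (s₁ s₂ : List (List Int)), (∀ x ∈ L, (x ∈ s₁ ↔ x ∈ s₂)) → dgo s₁ L = dgo s₂ L := by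
  induction L with
  | nil => intros; rfl
  | cons x xs ih =>
    intro s₁ s₂ h
    have hx := h x (by simp)
    by_cases hm : x ∈ s₁
    · simp only [dgo, if_pos hm, if_pos (hx.mp hm)]
      exact ih _ _ fun y hy => h y (by simp [hy])
    · simp only [dgo, if_neg hm, if_neg (fun c => hm (hx.mpr c))]
      refine congrArg _ (ih _ _ fun y hy => ?_)
      simp only [List.mem_append, List.mem_singleton]
      have := h y (by simp [hy]); tauto

theorem dgo_append (L₁ : List (List Int)) : ∀ (L₂ s : List (List Int)),
    dgo s (L₁ ++ L₂) = dgo s L₁ ++ dgo (L₁ ++ s) L₂ := by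
  induction L₁ with
  | nil => intro L₂ s; simp [dgo]
  | cons x xs ih =>
    intro L₂ s
    by_cases hm : x ∈ s
    · simp only [List.cons_append, dgo, if_pos hm]
      rw [ih]
      refine congrArg _ (dgo_agree _ _ _ fun y _ => ?_)
      simp only [List.mem_append, List.mem_cons]
      constructor
      · tauto
      · rintro (rfl | h | h) <;> tauto
    · simp only [List.cons_append, dgo, if_neg hm]
      rw [ih]
      refine congrArg _ (congrArg _ (dgo_agree _ _ _ fun y _ => ?_))
      simp only [List.mem_append, List.mem_cons]
      tauto

theorem dgo_drop (L₁ : List (List Int)) : ∀ (L₂ s : List (List Int)), (∀ x ∈ L₁, x ∈ s) →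
    dgo s (L₁ ++ L₂) = dgo s L₂ := by
  induction L₁ with
  | nil => intros; rfl
  | cons x xs ih =>
    intro L₂ s h
    simp only [List.cons_append, dgo, if_pos (h x (by simp))]
    exact ih _ _ fun y hy => h y (by simp [hy])

theorem dgo_map_cons (v : Int) (L : List (List Int)) : ∀ (S : List (List Int)),
    dgo (S.map (fun t => v :: t)) (L.map (fun t => v :: t)) = (dgo S L).map (fun t => v :: t) := by
  induction L with
  | nil => intros; rfl
  | cons x xs ih =>
    intro S
    have hmem : (v :: x) ∈ S.map (fun t => v :: t) ↔ x ∈ S := by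
      simp
    by_cases hm : x ∈ S
    · simp only [List.map_cons, dgo, if_pos (hmem.mpr hm), if_pos hm, ih]
    · simp only [List.map_cons, dgo, if_neg (fun c => hm (hmem.mp c)), if_neg hm]
      have h2 : List.map (fun t => v :: t) S ++ [v :: x] = List.map (fun t => v :: t) (S ++ [x]) := by
        simp
      rw [h2, ih]

theorem pa_loop (items : List Int) (k : Int) (f r : Nat) (U : List Nat) (perm : List Int)
    (IH : ∀ (U' : List Nat) (perm' : List Int) (res' : List (List Int)), (perm'.length : Int) + r = k →
      paRec f k items U' perm' res' = res' ++ (dgo [] (pvG items r U')).map (fun t => perm' ++ t))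
    (hlen : (perm.length : Int) + (r + 1) = k) :
    ∀ (I : List Nat), (∀ i ∈ I, i < items.length) →
    ∀ (seenV : List Int) (s res : List (List Int)),
    (∀ x, x ∈ s ↔ ∃ v, v ∈ seenV ∧ ∃ t : List Int, x = v :: t ∧ t.length = r ∧ (↑t : Multiset Int) ≤ (pvAvail items U).erase v) →
    (∀ v ∈ seenV, v ∈ pvAvail items U) →
    (I.foldl
        (fun (st : PySem.Set Int × List (List Int)) (i : Nat) =>
          if i ∈ U then st
          else if items.getD i 0 ∈ st.1 then st
          else (PySem.Set.add st.1 (items.getD i 0),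
                paRec f k items (PySem.Set.add U i) (perm ++ [items.getD i 0]) st.2))
        (seenV, res)).2
    = res ++ (dgo s (I.flatMap (fun i => if i ∈ U then [] else (pvG items r (i :: U)).map (fun t => items.getD i 0 :: t)))).map (fun t => perm ++ t) := by
  intro I
  induction I with
  | nil => intro _ seenV s res _ _; simp [dgo]
  | cons i I ihI =>
    intro hI seenV s res hInv hseen
    have hiN : i < items.length := hI i (by simp)
    have hI' : ∀ j ∈ I, j < items.length := fun j hj => hI j (by simp [hj])
    by_cases hiU : i ∈ U
    · simp only [List.foldl_cons, List.flatMap_cons, if_pos hiU, List.nil_append]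
      exact ihI hI' seenV s res hInv hseen
    · simp only [List.foldl_cons, List.flatMap_cons, if_neg hiU]
      set v := items.getD i 0 with hv
      by_cases hvS : v ∈ seenV
      · -- duplicate value at this level: fold skips, dedup swallows the whole branch
        simp only [if_pos hvS]
        have hdrop : ∀ x ∈ (pvG items r (i :: U)).map (fun t => v :: t), x ∈ s := by
          intro x hx
          obtain ⟨t, ht, rfl⟩ := List.mem_map.mp hx
          obtain ⟨hlen', hle⟩ := (pvG_mem items r (i :: U) t).mp ht
          rw [pvAvail_cons items U i hiN hiU] at hle
          exact (hInv _).mpr ⟨v, hvS, t, rfl, hlen', hle⟩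
        rw [dgo_drop _ _ _ hdrop]
        exact ihI hI' seenV s res hInv hseen
      · -- fresh value: recursive call, dedup emits the whole branch
        simp only [if_neg hvS]
        have hadd : PySem.Set.add seenV v = seenV ++ [v] := by
          simp [PySem.Set.add, PySem.Set.contains, hvS]
        have haddU : ∀ j, j ∈ PySem.Set.add U i ↔ j ∈ i :: U := by
          intro j
          simp [PySem.Set.add, PySem.Set.contains, hiU, List.mem_append, List.mem_cons, or_comm]
        have hrec : paRec f k items (PySem.Set.add U i) (perm ++ [v]) res
            = res ++ (dgo [] (pvG items r (i :: U))).map (fun t => (perm ++ [v]) ++ t) := by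
          rw [IH _ _ _ (by simp; omega)]
          rw [pvG_congr items r _ _ haddU]
        set B := (pvG items r (i :: U)).map (fun t => v :: t) with hB
        have hBs : ∀ x ∈ B, (x ∈ s ↔ x ∈ ([] : List (List Int))) := by
          intro x hx
          obtain ⟨t, ht, rfl⟩ := List.mem_map.mp hx
          simp only [List.not_mem_nil, iff_false]
          intro hxs
          obtain ⟨w, hw, t', heq, -, -⟩ := (hInv _).mp hxs
          injection heq with h1 _
          exact hvS (by rwa [← h1] at hw)
        have hgoB : dgo s B = (dgo [] (pvG items r (i :: U))).map (fun t => v :: t) := by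
          have hmc := dgo_map_cons v (pvG items r (i :: U)) []
          simp only [List.map_nil] at hmc
          rw [dgo_agree _ _ _ hBs, hB, hmc]
        rw [dgo_append]
        have hInv' : ∀ x, x ∈ B ++ s ↔ ∃ w, w ∈ seenV ++ [v] ∧ ∃ t : List Int, x = w :: t ∧ t.length = r ∧ (↑t : Multiset Int) ≤ (pvAvail items U).erase w := by
          intro x
          simp only [List.mem_append, List.mem_singleton]
          constructor
          · rintro (hxB | hxs)
            · obtain ⟨t, ht, rfl⟩ := List.mem_map.mp hxB
              obtain ⟨hlen', hle⟩ := (pvG_mem items r (i :: U) t).mp ht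
              rw [pvAvail_cons items U i hiN hiU] at hle
              exact ⟨v, Or.inr rfl, t, rfl, hlen', hle⟩
            · obtain ⟨w, hw, t, rfl, h1, h2⟩ := (hInv _).mp hxs
              exact ⟨w, Or.inl hw, t, rfl, h1, h2⟩
          · rintro ⟨w, (hw | rfl), t, rfl, h1, h2⟩
            · exact Or.inr ((hInv _).mpr ⟨w, hw, t, rfl, h1, h2⟩)
            · refine Or.inl (List.mem_map.mpr ⟨t, ?_, rfl⟩)
              refine (pvG_mem items r (i :: U) t).mpr ⟨h1, ?_⟩
              rw [pvAvail_cons items U i hiN hiU]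
              exact h2
        have hseen' : ∀ w ∈ seenV ++ [v], w ∈ pvAvail items U := by
          intro w hw
          rcases List.mem_append.mp hw with h | h
          · exact hseen w h
          · rw [List.mem_singleton.mp h]
            exact pvAvail_mem items U i hiN hiU
        have := ihI hI' (seenV ++ [v]) (B ++ s) (res ++ (dgo s B).map (fun t => perm ++ t)) hInv' hseen'
        have hcomb : List.map (fun t => perm ++ [v] ++ t) (dgo [] (pvG items r (i :: U)))
            = List.map (fun t => perm ++ t) (dgo s B) := by
          rw [hgoB, List.map_map]
          exact List.map_congr_left fun t _ => by simp
        rw [hadd, hrec, hcomb, this, List.map_append, List.append_assoc]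

theorem paRec_eq (items : List Int) (k : Int) : ∀ (f r : Nat), r < f →
    ∀ (U : List Nat) (perm : List Int) (res : List (List Int)), (perm.length : Int) + r = k →
    paRec f k items U perm res = res ++ (dgo [] (pvG items r U)).map (fun t => perm ++ t) := by
  intro f
  induction f with
  | zero => intro r hr; omega
  | succ f ihf =>
    intro r hr U perm res hlen
    match r, hlen with
    | 0, hlen =>
      have h0 : (perm.length : Int) = k := by push_cast at hlen; omega
      simp [paRec, h0, pvG, dgo]
    | r + 1, hlen =>
      have hne : ¬ ((perm.length : Int) = k) := by push_cast at hlen; omega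
      simp only [paRec, if_neg hne, pvG]
      exact pa_loop items k f r U perm
        (fun U' perm' res' h => ihf r (by omega) U' perm' res' h)
        (by push_cast at hlen ⊢; omega)
        (List.range items.length) (fun i hi => List.mem_range.mp hi)
        [] [] res (by simp) (by simp)

def pvGi (items : List Int) : Nat → List Nat → List (List Nat)
  | 0, _ => [[]]
  | r + 1, U =>
    (List.range items.length).flatMap (fun i =>
      if i ∈ U then [] else (pvGi items r (i :: U)).map (fun t => i :: t))

theorem pvGi_vals (items : List Int) (r : Nat) : ∀ (U : List Nat),
    (pvGi items r U).map (fun p => p.map (fun i => items.getD i 0)) = pvG items r U := by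
  induction r with
  | zero => intro U; rfl
  | succ r ih =>
    intro U
    simp only [pvGi, pvG, List.map_flatMap]
    congr 1
    funext i
    by_cases hiU : i ∈ U
    · simp [hiU]
    · simp only [if_neg hiU, List.map_map]
      rw [← ih (i :: U), List.map_map]
      rfl

-- generic: flatMap over if-[]-else-singleton equals map over filter
theorem flatMap_if_filter (l : List Nat) (U : List Nat) (f : Nat → List Nat) :
    l.flatMap (fun i => if i ∈ U then [] else [f i])
      = (l.filter (fun i => decide (i ∉ U))).map f := by
  induction l with
  | nil => rfl
  | cons x xs ih =>
    by_cases hx : x ∈ U <;> simp [hx, ih]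

theorem pvGi_snoc (items : List Int) (r : Nat) : ∀ (U : List Nat),
    pvGi items (r + 1) U
      = (pvGi items r U).flatMap (fun t =>
          ((List.range items.length).filter (fun i => decide (i ∉ U) && decide (i ∉ t))).map (fun i => t ++ [i])) := by
  induction r with
  | zero =>
    intro U
    show (List.range items.length).flatMap (fun i => if i ∈ U then [] else [[i]]) = _
    rw [flatMap_if_filter (List.range items.length) U (fun i => [i])]
    simp [pvGi]
  | succ r ih =>
    intro U
    have lhs : pvGi items (r + 2) U
        = (List.range items.length).flatMap (fun i =>
            if i ∈ U then []
            else (pvGi items r (i :: U)).flatMap (fun t =>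
              ((List.range items.length).filter (fun j => decide (j ∉ i :: U) && decide (j ∉ t))).map (fun j => i :: (t ++ [j])))) := by
      show (List.range items.length).flatMap (fun i =>
          if i ∈ U then [] else (pvGi items (r + 1) (i :: U)).map (fun t => i :: t)) = _
      congr 1
      funext i
      by_cases hiU : i ∈ U
      · simp [hiU]
      · simp only [if_neg hiU, ih (i :: U), List.map_flatMap, List.map_map]
        rfl
    rw [lhs]
    show _ = ((List.range items.length).flatMap (fun i =>
        if i ∈ U then [] else (pvGi items r (i :: U)).map (fun t => i :: t))).flatMap
          (fun t => ((List.range items.length).filter (fun j => decide (j ∉ U) && decide (j ∉ t))).map (fun j => t ++ [j]))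
    rw [List.flatMap_assoc]
    congr 1
    funext i
    by_cases hiU : i ∈ U
    · simp [hiU]
    · simp only [if_neg hiU, List.flatMap_map]
      congr 1
      funext t
      have hpred : ∀ j : Nat, (decide (j ∉ i :: U) && decide (j ∉ t)) = (decide (j ∉ U) && decide (j ∉ i :: t)) := by
        intro j
        by_cases h1 : j = i <;> by_cases h2 : j ∈ U <;> by_cases h3 : j ∈ t <;>
          simp [h1, h2, h3, List.mem_cons]
      rw [show ((List.range items.length).filter (fun j => decide (j ∉ i :: U) && decide (j ∉ t)))
            = ((List.range items.length).filter (fun j => decide (j ∉ U) && decide (j ∉ i :: t))) from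
          List.filter_congr fun j _ => hpred j]
      simp

theorem bfs_eq (items : List Int) : ∀ (m : Nat) (P : List (List Nat)),
    (List.range m).foldl (fun ps _ => pbStep items ps) P
      = P.flatMap (fun p => (pvGi items m p).map (fun t => p ++ t)) := by
  intro m
  induction m with
  | zero => intro P; simp [pvGi]
  | succ m ih =>
    intro P
    rw [List.range_succ, List.foldl_append]
    simp only [List.foldl_cons, List.foldl_nil]
    rw [ih P]
    simp only [pbStep, List.flatMap_assoc]
    congr 1
    funext p
    rw [pvGi_snoc items m p]
    simp only [List.flatMap_map, List.map_flatMap, List.map_map]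
    congr 1
    funext t
    have hpred : ∀ j : Nat, (decide (j ∉ p ++ t)) = (decide (j ∉ p) && decide (j ∉ t)) := by
      intro j; by_cases h1 : j ∈ p <;> by_cases h2 : j ∈ t <;> simp [h1, h2, List.mem_append]
    rw [List.filter_congr fun j _ => hpred j]
    simp

theorem pbDedup_eq_dgo (items : List Int) : ∀ (ps : List (List Nat)) (seen : List (List Int)),
    pbDedup items seen ps = dgo seen (ps.map (fun p => p.map (fun i => items.getD i 0))) := by
  intro ps
  induction ps with
  | nil => intro seen; rfl
  | cons p ps ih =>
    intro seen
    by_cases hm : p.map (fun i => items.getD i 0) ∈ seen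
    · simp only [pbDedup, List.map_cons, dgo, if_pos hm, ih]
    · simp only [pbDedup, List.map_cons, dgo, if_neg hm]
      generalize p.map (fun i => items.getD i 0) = vals at hm ⊢
      rw [ih, show PySem.Set.add seen vals = seen ++ [vals] from by
        simp [PySem.Set.add, PySem.Set.contains, hm]]

theorem pv_main : ∀ (k : Int) (items : List Int), 0 ≤ k → k ≤ (items.length : Int) →
    selected_permutations k items = selected_permutations_alt k items := by
  intro k items h0 h1
  have hng : ¬ (k > (items.length : Int)) := by omega
  have hng2 : ¬ (k < 0) := by omega
  unfold selected_permutations selected_permutations_alt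
  rw [if_neg hng, if_neg hng2, if_neg hng, if_neg hng2]
  have hA := paRec_eq items k (items.length + 1) k.toNat (by omega)
    (PySem.Set.empty : PySem.Set Nat) [] [] (by simp; omega)
  rw [hA, pbDedup_eq_dgo, bfs_eq]
  simp only [List.flatMap_cons, List.flatMap_nil, List.append_nil, List.nil_append]
  simp only [PySem.Set.empty, List.map_id']
  rw [pvGi_vals]

-- ===== VERDICT (by name: the statement is the Claim_ definition above) =====
theorem selected_permutations_spec : Claim_equal_selected_permutations := by
  intro selection_size items _ hPre
  unfold Spec_selected_permutations
  exact pv_main selection_size items hPre.1 hPre.2
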